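-- pv_equiv track=rewrite | github.com/MK-Koushik-Iyer/HireTrack-Skill-Bridge-Career-Navigator | app/backend/server.py | expand_skill_aliases
-- ===== SOURCE A (Python) =====
-- from typing import List, Optional, Dict
--
-- SKILL_ALIASES = {
--     "k8s": "kubernetes",
--     "js": "javascript",
--     "ts": "typescript",
--     "py": "python",
--     "ml": "machine learning",
--     "dl": "deep learning",
--     "ai": "artificial intelligence",
--     "aws lambda": "aws",
--     "ec2": "aws",
--     "s3": "aws",
--     "react.js": "react",
--     "reactjs": "react",
--     "vue.js": "vue",
--     "vuejs": "vue",
--     "node.js": "nodejs",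
--     "node": "nodejs",
--     "postgres": "postgresql",
--     "mongo": "mongodb",
--     "tf": "terraform",
--     "gcp": "google cloud platform",
--     "ci/cd": "cicd",
--     "devops": "ci/cd"
-- }
--
-- def expand_skill_aliases(skills: List[str]) -> List[str]:
--     """Expand skills with their aliases for better matching"""
--     expanded = []
--     for skill in skills:
--         expanded.append(skill)
--         skill_lower = skill.lower()
--         if skill_lower in SKILL_ALIASES:
--             expanded.append(SKILL_ALIASES[skill_lower])
--         for alias, target in SKILL_ALIASES.items():
--             if skill_lower == target:
--                 expanded.append(alias)
--     return list(set(expanded))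
-- ===== SOURCE B (Python) =====
-- SKILL_ALIASES = {
--     "k8s": "kubernetes",
--     "js": "javascript",
--     "ts": "typescript",
--     "py": "python",
--     "ml": "machine learning",
--     "dl": "deep learning",
--     "ai": "artificial intelligence",
--     "aws lambda": "aws",
--     "ec2": "aws",
--     "s3": "aws",
--     "react.js": "react",
--     "reactjs": "react",
--     "vue.js": "vue",
--     "vuejs": "vue",
--     "node.js": "nodejs",
--     "node": "nodejs",
--     "postgres": "postgresql",
--     "mongo": "mongodb",
--     "tf": "terraform",
--     "gcp": "google cloud platform",
--     "ci/cd": "cicd",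
--     "devops": "ci/cd"
-- }
--
-- # Precomputed once: every lowercase key (alias or canonical target) maps to its
-- # full expansion group (its target first, then all aliases pointing at it).
-- _EXPANSION = {}
-- for _alias, _target in SKILL_ALIASES.items():
--     _EXPANSION.setdefault(_alias, []).append(_target)
-- for _alias, _target in SKILL_ALIASES.items():
--     _EXPANSION.setdefault(_target, []).append(_alias)
--
--
-- def expand_skill_aliases(skills):
--     """Expand skills with their aliases for better matching"""
--     return list(set(x for skill in skills
--                       for x in [skill, *_EXPANSION.get(skill.lower(), [])]))
-- ===== Notes on version B (the rewrite author's own statement) =====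
-- stated objective: faster
-- what changed: B precomputes, once, a single expansion dict mapping every lowercase alias/target key to its whole group (target first, then all aliases in dict order), so the per-skill work becomes one dict lookup emitted through a flat comprehension instead of A's per-skill membership test plus a full rescan of SKILL_ALIASES.items().
import Mathlib
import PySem

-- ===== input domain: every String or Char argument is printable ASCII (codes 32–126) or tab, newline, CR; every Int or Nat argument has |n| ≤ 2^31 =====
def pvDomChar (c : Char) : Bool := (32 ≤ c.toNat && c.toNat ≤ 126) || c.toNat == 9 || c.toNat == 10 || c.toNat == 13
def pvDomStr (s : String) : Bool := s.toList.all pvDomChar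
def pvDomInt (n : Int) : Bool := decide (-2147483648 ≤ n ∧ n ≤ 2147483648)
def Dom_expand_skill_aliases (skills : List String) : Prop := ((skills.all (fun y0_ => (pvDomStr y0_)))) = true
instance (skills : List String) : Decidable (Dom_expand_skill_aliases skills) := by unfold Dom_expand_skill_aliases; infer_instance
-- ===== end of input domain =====

-- B precomputes a single expansion dict (key -> its whole alias group) once and emits
-- the result with one flat comprehension; objective: alternative (removes the per-skill
-- rescan of SKILL_ALIASES).


def SKILL_ALIASES : PySem.Dict String String := PySem.Dict.ofList
  [("k8s", "kubernetes"), ("js", "javascript"), ("ts", "typescript"), ("py", "python"),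
   ("ml", "machine learning"), ("dl", "deep learning"), ("ai", "artificial intelligence"),
   ("aws lambda", "aws"), ("ec2", "aws"), ("s3", "aws"),
   ("react.js", "react"), ("reactjs", "react"), ("vue.js", "vue"), ("vuejs", "vue"),
   ("node.js", "nodejs"), ("node", "nodejs"), ("postgres", "postgresql"), ("mongo", "mongodb"),
   ("tf", "terraform"), ("gcp", "google cloud platform"), ("ci/cd", "cicd"), ("devops", "ci/cd")]

-- ===== PORT A =====
def expand_skill_aliases (skills : List String) : List String :=
  let expanded := skills.foldl (fun acc skill =>
    let acc := acc ++ [skill]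
    let skill_lower := PySem.Str.lower skill
    -- 'if skill_lower in SKILL_ALIASES: expanded.append(SKILL_ALIASES[skill_lower])'
    let acc := match PySem.Dict.get? SKILL_ALIASES skill_lower with
      | some t => acc ++ [t]
      | none => acc
    (PySem.Dict.items SKILL_ALIASES).foldl
      (fun acc p => if skill_lower == p.2 then acc ++ [p.1] else acc) acc) []
  PySem.Set.ofList expanded

-- ===== PORT B =====
-- '_EXPANSION.setdefault(k, []).append(v)' = Dict.modify k [] (· ++ [v])
def pvExpansion : PySem.Dict String (List String) :=
  (PySem.Dict.items SKILL_ALIASES).foldl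
    (fun d p => PySem.Dict.modify d p.2 [] (fun l => l ++ [p.1]))
    ((PySem.Dict.items SKILL_ALIASES).foldl
      (fun d p => PySem.Dict.modify d p.1 [] (fun l => l ++ [p.2])) PySem.Dict.empty)

def expand_skill_aliases_alt (skills : List String) : List String :=
  PySem.Set.ofList (skills.flatMap
    (fun skill => skill :: PySem.Dict.getD pvExpansion (PySem.Str.lower skill) []))

-- ===== PRECONDITION & SPEC =====
def Spec_expand_skill_aliases (skills : List String) (out : List String) : Prop := out = expand_skill_aliases_alt skills
instance (skills : List String) (out : List String) : Decidable (Spec_expand_skill_aliases skills out) := by unfold Spec_expand_skill_aliases; infer_instance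

-- ===== CLAIM (what is proved, stated in full; the proofs are below) =====
def Claim_equal_expand_skill_aliases : Prop := ∀ (skills : List String), Dom_expand_skill_aliases skills → Spec_expand_skill_aliases skills (expand_skill_aliases skills)

-- ===== LEMMAS AND PROOFS =====

-- first-match lookup in an assoc list with distinct keys = filter on the key
theorem pv_filter_fst_eq_get? (ps : List (String × String))
    (h : (ps.map Prod.fst).Nodup) (k : String) :
    (ps.filter (fun p => p.1 == k)).map Prod.snd =
      (match PySem.Dict.get? (PySem.Dict.mk ps) k with | some t => [t] | none => []) := by
  induction ps with
  | nil => simp [PySem.Dict.get?]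
  | cons hd tl ih =>
    simp only [List.map_cons, List.nodup_cons] at h
    by_cases hk : hd.1 = k
    · subst hk
      have hnot : ∀ p ∈ tl, ¬ (p.1 == hd.1) = true := by
        intro p hp hb
        exact h.1 (List.mem_map.mpr ⟨p, hp, (beq_iff_eq.mp hb)⟩)
      simp [PySem.Dict.get?, List.filter_eq_nil_iff.mpr hnot]
    · have : (hd.1 == k) = false := beq_eq_false_iff_ne.mpr hk
      simp [PySem.Dict.get?, this, ih h.2]

-- what pvExpansion stores at any key
theorem pv_key (k : String) :
    PySem.Dict.getD pvExpansion k [] =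
      (match PySem.Dict.get? SKILL_ALIASES k with | some t => [t] | none => []) ++
      ((PySem.Dict.items SKILL_ALIASES).filter (fun p => k == p.2)).map Prod.fst := by
  have hnd : ((PySem.Dict.items SKILL_ALIASES).map Prod.fst).Nodup := by decide
  unfold pvExpansion
  have hswap : ∀ (d : PySem.Dict String (List String)) (l : List (String × String)),
      List.foldl (fun d p => PySem.Dict.modify d p.2 [] (fun v => v ++ [p.1])) d l =
      List.foldl (fun d p => PySem.Dict.modify d p.1 [] (fun v => v ++ [p.2])) d
        (l.map Prod.swap) := by
    intro d l; rw [List.foldl_map]; rfl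
  rw [hswap, PySem.Dict.getD_foldl_modify_append, PySem.Dict.getD_foldl_modify_append]
  have hfm := pv_filter_fst_eq_get? (PySem.Dict.items SKILL_ALIASES) hnd k
  simp only [PySem.Dict.getD_empty, List.nil_append] at *
  rw [hfm]
  congr 1
  rw [List.filter_map, List.map_map]
  have hft : List.filter ((fun (p : String × String) => p.1 == k) ∘ Prod.swap)
        (PySem.Dict.items SKILL_ALIASES)
      = List.filter (fun p => k == p.2) (PySem.Dict.items SKILL_ALIASES) := by
    apply List.filter_congr
    intro p _
    simp [Function.comp, eq_comm]
  rw [hft]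
  simp [Function.comp]

-- ===== VERDICT (by name: the statement is the Claim_ definition above) =====
theorem expand_skill_aliases_spec : Claim_equal_expand_skill_aliases := by
  intro skills _
  show _ = _
  unfold expand_skill_aliases expand_skill_aliases_alt
  have hf : (fun (acc : List String) (skill : String) =>
      let acc := acc ++ [skill]
      let skill_lower := PySem.Str.lower skill
      let acc := match PySem.Dict.get? SKILL_ALIASES skill_lower with
        | some t => acc ++ [t]
        | none => acc
      (PySem.Dict.items SKILL_ALIASES).foldl
        (fun acc p => if skill_lower == p.2 then acc ++ [p.1] else acc) acc) =
      (fun acc skill =>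
        acc ++ (skill :: PySem.Dict.getD pvExpansion (PySem.Str.lower skill) [])) := by
    funext acc s
    simp only [PySem.List.foldl_append_if, pv_key]
    cases PySem.Dict.get? SKILL_ALIASES (PySem.Str.lower s) <;> simp
  rw [hf, PySem.List.foldl_append_eq_flatMap, List.nil_append]
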